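-- pv_equiv track=rewrite | github.com/zedeckj/bulletchess | bulletchess/engine.py | flip_table
-- ===== SOURCE A (Python) =====
-- def flip_table(table : list[int]):
--     new_table = []
--     for square in range(0, 64, 8):
--         rank = table[square : square + 8]
--         rank.reverse()
--         new_table.extend(rank)
--     new_table.reverse()
--     return new_table
-- ===== SOURCE B (Python) =====
-- def flip_table(table : list[int]):
--     def go(t, k):
--         if k == 0:
--             return []
--         return go(t[8:], k - 1) + t[:8]
--     return go(table, 8)
-- ===== Notes on version B (the rewrite author's own statement) =====
-- stated objective: simpler
-- what changed: B replaces the reverse-each-rank-then-reverse-all loop by a recursion that peels the leading 8-element rank off the front, recurses on the rest, and appends the peeled rank after the recursive result, so no reversal is ever performed.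
import Mathlib
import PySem

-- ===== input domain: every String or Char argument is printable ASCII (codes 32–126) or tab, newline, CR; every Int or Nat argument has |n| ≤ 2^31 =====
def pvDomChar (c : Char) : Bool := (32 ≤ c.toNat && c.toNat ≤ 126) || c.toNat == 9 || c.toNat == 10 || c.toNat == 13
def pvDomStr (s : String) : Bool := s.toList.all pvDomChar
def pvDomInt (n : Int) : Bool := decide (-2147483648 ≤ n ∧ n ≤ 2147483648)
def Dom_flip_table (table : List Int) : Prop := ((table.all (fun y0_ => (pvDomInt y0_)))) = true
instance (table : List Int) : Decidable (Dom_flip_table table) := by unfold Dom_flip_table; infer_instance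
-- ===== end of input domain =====

-- B replaces the reverse-each-rank-then-reverse-all loop by a recursion peeling the leading
-- 8-element rank off the front and appending it after the recursive result (objective: simpler).

-- ===== PORT A =====
def flip_table (table : List Int) : List Int :=
  ((PySem.List.pyRange 0 64 8).foldl
    (fun new_table square =>
      new_table ++ (PySem.List.slice table (some square) (some (square + 8))).reverse)
    []).reverse

-- ===== PORT B =====
-- helper go(t, k): if k == 0 return [], else go(t[8:], k-1) + t[:8]
def flipGo (t : List Int) : Nat → List Int
  | 0 => []
  | k + 1 =>
      flipGo (PySem.List.slice t (some 8) none) k ++ PySem.List.slice t none (some 8)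

def flip_table_alt (table : List Int) : List Int := flipGo table 8

-- ===== PRECONDITION & SPEC =====
def Spec_flip_table (table : List Int) (out : List Int) : Prop := out = flip_table_alt table
instance (table : List Int) (out : List Int) : Decidable (Spec_flip_table table out) := by unfold Spec_flip_table; infer_instance

-- ===== CLAIM =====
def Claim_equal_flip_table : Prop := ∀ (table : List Int), Dom_flip_table table → Spec_flip_table table (flip_table table)

-- ===== LEMMAS AND PROOFS =====
lemma rangeA_eval : PySem.List.pyRange 0 64 8 = [0, 8, 16, 24, 32, 40, 48, 56] := by decide

-- ===== VERDICT =====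
theorem flip_table_spec : Claim_equal_flip_table := by
  intro table _
  unfold Spec_flip_table flip_table flip_table_alt
  rw [rangeA_eval]
  simp only [List.foldl, List.nil_append, List.reverse_append, List.reverse_reverse,
    List.append_assoc]
  norm_num [PySem.List.slice_toNat, flipGo, PySem.List.slice_from,
    PySem.List.slice_to, List.drop_drop]
  rfl
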